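-- pv_equiv track=rewrite | github.com/BurningTiles/dailycoding | 2021-12-02/solution.py | chainedWords
-- ===== SOURCE A (Python) =====
-- def dfs(start, adj, visited):
-- 	visited[start] = True
-- 	for end in adj[start]:
-- 		if not visited[end]:
-- 			dfs(end, adj, visited)
--
-- def isConnected(start, adj, mark):
-- 	visited = [False]*26
-- 	dfs(start, adj, visited)
--
-- 	for i in range(26):
-- 		if mark[i] and not visited[i]: return False
-- 	return True
--
-- def chainedWords(words):
-- 	mark = [False]*26
-- 	adj = [[] for _ in range(26)]
-- 	inBound, outBound = [0]*26, [0]*26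
-- 	for word in words:
-- 		x=ord(word[0])-97
-- 		y=ord(word[-1])-97
-- 		mark[x], mark[y] = True, True
-- 		inBound[x] += 1
-- 		outBound[y] += 1
-- 		adj[x].append(y)
-- 	for i in range(26):
-- 		if inBound[i]!=outBound[i]: return False
-- 	return isConnected(ord(words[0][0])-97, adj, mark)
-- ===== SOURCE B (Python) =====
-- def chainedWords(words):
--     start = ord(words[0][0]) - 97
--     deg = [0] * 26
--     marks = set()
--     edges = []
--     for word in words:
--         x = ord(word[0]) - 97
--         y = ord(word[-1]) - 97
--         marks.add(x)
--         marks.add(y)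
--         deg[x] += 1
--         deg[y] -= 1
--         edges.append((x, y))
--     if any(deg):
--         return False
--     reach = {start}
--     for _ in range(26):
--         for x, y in edges:
--             if x in reach:
--                 reach.add(y)
--     return marks <= reach
-- ===== Notes on version B (the rewrite author's own statement) =====
-- stated objective: alternative
-- what changed: The recursive DFS over per-letter adjacency lists is replaced by a set-based reachability closure: one pass records an in/out degree difference, the mark set and the edge list, then 26 relaxation rounds over the edge list grow the reachable set from the first letter, and connectivity is a subset test marks <= reach.
-- outside the precondition, e.g. on chainedWords(['aa', 'GG']): A returns True, B returns False; on chainedWords([]): A raises IndexError, B raises IndexError; on chainedWords(['ab', '1a']): A raises IndexError, B raises IndexError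
import Mathlib
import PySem

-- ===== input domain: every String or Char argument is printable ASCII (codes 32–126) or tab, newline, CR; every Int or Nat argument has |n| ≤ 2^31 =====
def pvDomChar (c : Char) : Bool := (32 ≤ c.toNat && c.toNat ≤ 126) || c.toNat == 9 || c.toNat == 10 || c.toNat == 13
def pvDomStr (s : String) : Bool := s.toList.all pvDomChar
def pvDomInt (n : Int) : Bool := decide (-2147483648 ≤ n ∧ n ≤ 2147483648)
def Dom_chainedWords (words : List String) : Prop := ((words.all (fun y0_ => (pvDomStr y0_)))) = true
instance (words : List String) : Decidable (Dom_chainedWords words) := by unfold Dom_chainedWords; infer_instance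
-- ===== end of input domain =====

-- B replaces A's recursive DFS connectivity check with an iterative set-based reachability
-- closure over an edge list (alternative decomposition, similar cost); equivalence is about
-- the return value on the natural domain of nonempty lowercase-delimited words (see Pre_).

-- ord(word[0]) - 97 and ord(word[-1]) - 97 (exact for nonempty words, which Pre_ guarantees)
def pvOrd0 (w : String) : Int := ((w.toList.headD ' ').toNat : Int) - 97
def pvOrdLast (w : String) : Int := ((w.toList.getLastD ' ').toNat : Int) - 97

-- ===== PORT A =====
-- recursive dfs of Source A; fuel only makes the recursion total (27 > 26 possible marks),
-- indices are .toNat of Ints that are in [0, 26) on every input Pre_ admits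
def dfsF : Nat → List (List Int) → List Bool → Int → List Bool
  | 0, _, visited, _ => visited
  | fuel+1, adj, visited, start =>
    (adj.getD start.toNat []).foldl
      (fun vis e => if vis.getD e.toNat false then vis else dfsF fuel adj vis e)
      (visited.set start.toNat true)

def isConnectedA (start : Int) (adj : List (List Int)) (mark : List Bool) : Bool :=
  let visited := dfsF 27 adj (List.replicate 26 false) start
  (List.range 26).all (fun i => !(mark.getD i false && !(visited.getD i false)))

-- body of A's 'for word in words' loop: state (mark, adj, inBound, outBound)
def stepA (st : List Bool × List (List Int) × List Int × List Int) (word : String) :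
    List Bool × List (List Int) × List Int × List Int :=
  let x := pvOrd0 word
  let y := pvOrdLast word
  let mark := (st.1.set x.toNat true).set y.toNat true
  let adj := st.2.1.set x.toNat (st.2.1.getD x.toNat [] ++ [y])
  let inB := st.2.2.1.set x.toNat (st.2.2.1.getD x.toNat 0 + 1)
  let outB := st.2.2.2.set y.toNat (st.2.2.2.getD y.toNat 0 + 1)
  (mark, adj, inB, outB)

def chainedWords (words : List String) : Bool :=
  let st := words.foldl stepA
    (List.replicate 26 false, List.replicate 26 ([] : List Int),
     List.replicate 26 (0 : Int), List.replicate 26 (0 : Int))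
  if (List.range 26).all (fun i => st.2.2.1.getD i 0 == st.2.2.2.getD i 0) then
    isConnectedA (pvOrd0 (words.headD "")) st.2.1 st.1
  else false

-- ===== PORT B =====
-- body of B's building loop: state (deg, marks, edges)
def stepB (st : List Int × PySem.Set Int × List (Int × Int)) (word : String) :
    List Int × PySem.Set Int × List (Int × Int) :=
  let x := pvOrd0 word
  let y := pvOrdLast word
  let marks := (st.2.1.add x).add y
  let deg1 := st.1.set x.toNat (st.1.getD x.toNat 0 + 1)
  let deg2 := deg1.set y.toNat (deg1.getD y.toNat 0 - 1)
  (deg2, marks, st.2.2 ++ [(x, y)])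

-- one 'for x, y in edges' relaxation round
def relaxRound (edges : List (Int × Int)) (S : PySem.Set Int) : PySem.Set Int :=
  edges.foldl (fun S e => if PySem.Set.contains S e.1 then S.add e.2 else S) S

def chainedWords_alt (words : List String) : Bool :=
  let start := pvOrd0 (words.headD "")
  let st := words.foldl stepB (List.replicate 26 (0 : Int), PySem.Set.empty, [])
  if st.1.any (fun d => d != 0) then false
  else
    let reach := (List.range 26).foldl (fun S _ => relaxRound st.2.2 S)
      (PySem.Set.add PySem.Set.empty start)
    PySem.Set.issubset st.2.1 reach

-- ===== PRECONDITION & SPEC =====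
-- a word whose first and last characters are lowercase ASCII letters
def GoodWord (w : String) : Prop :=
  w.toList ≠ [] ∧ 97 ≤ (w.toList.headD ' ').toNat ∧ (w.toList.headD ' ').toNat ≤ 122 ∧
    97 ≤ (w.toList.getLastD ' ').toNat ∧ (w.toList.getLastD ' ').toNat ≤ 122

-- Pre_ restricts to the task's natural domain: a nonempty list of nonempty words whose first
-- and last characters are lowercase letters.  Outside it A raises IndexError (empty list,
-- empty word, first/last character below 'G' or above 'z') or, for first/last characters in
-- 'G'..'`', returns a value produced by Python's negative-index wraparound conflating such a
-- character with a lowercase letter — an artefact of A's implementation outside the natural domain.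
def Pre_chainedWords (words : List String) : Prop :=
  words ≠ [] ∧ ∀ w ∈ words, GoodWord w

instance (words : List String) : Decidable (Pre_chainedWords words) := by
  unfold Pre_chainedWords GoodWord; infer_instance

def pvWitness_chainedWords : List String := ["ab", "ba"]

def Spec_chainedWords (words : List String) (out : Bool) : Prop := out = chainedWords_alt words
instance (words : List String) (out : Bool) : Decidable (Spec_chainedWords words out) := by
  unfold Spec_chainedWords; infer_instance

-- ===== CLAIM (what is proved, stated in full; the proofs are below) =====
def Claim_equal_chainedWords : Prop := ∀ (words : List String), Dom_chainedWords words →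
  Pre_chainedWords words → Spec_chainedWords words (chainedWords words)



-- ===== LEMMAS AND PROOFS =====

-- node validity: the 26 letter indices
def NodeOk (a : Int) : Prop := 0 ≤ a ∧ a < 26

-- membership in a visited array, Python-index style
def Vis (v : List Bool) (a : Int) : Prop := v.getD a.toNat false = true

def VisLe (v v' : List Bool) : Prop := ∀ i : Nat, v.getD i false = true → v'.getD i false = true

def Nbrs (adj : List (List Int)) (a : Int) : List Int := adj.getD a.toNat []

def AdjOk (adj : List (List Int)) : Prop := ∀ (i : Nat), ∀ b ∈ adj.getD i [], NodeOk b

inductive ReachA (adj : List (List Int)) (s : Int) : Int → Prop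
  | refl : ReachA adj s s
  | step : ∀ {a b : Int}, ReachA adj s a → b ∈ Nbrs adj a → ReachA adj s b

inductive ReachE (E : List (Int × Int)) (s : Int) : Int → Prop
  | refl : ReachE E s s
  | step : ∀ {a b : Int}, ReachE E s a → (a, b) ∈ E → ReachE E s b

def SSub (S T : List Int) : Prop := ∀ a, a ∈ S → a ∈ T
def SEq (S T : List Int) : Prop := ∀ a, a ∈ S ↔ a ∈ T

theorem getD_set_formula {α : Type} (l : List α) (n i : Nat) (v d : α) (h : n < l.length) :
    (l.set n v).getD i d = if i = n then v else l.getD i d := by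
  by_cases hi : i = n
  · subst hi
    simp [List.getD, List.getElem?_set_self, h]
  · simp [List.getD, List.getElem?_set_ne (fun hc => hi hc.symm), hi]

theorem getD_replicate {α : Type} (n i : Nat) (a : α) :
    (List.replicate n a).getD i a = a := by
  simp [List.getD, List.getElem?_replicate]
  split <;> rfl

theorem getD_eq_getElem' {α : Type} (l : List α) (n : Nat) (d : α) (h : n < l.length) :
    l.getD n d = l[n] := by
  simp [List.getD, List.getElem?_eq_getElem h]

theorem count_false_set (v : List Bool) (n : Nat) (h : n < v.length)
    (hf : v.getD n false = false) : (v.set n true).count false + 1 = v.count false := by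
  induction v generalizing n with
  | nil => simp at h
  | cons a v ihv =>
    cases n with
    | zero =>
      simp [List.getD] at hf
      simp [List.set, List.count_cons, hf]
    | succ n =>
      simp at h
      simp [List.getD] at hf
      simp only [List.set, List.count_cons]
      have := ihv n h hf
      omega

theorem count_false_le_of_visle (v v' : List Bool) (hlen : v'.length = v.length)
    (h : VisLe v v') : v'.count false ≤ v.count false := by
  induction v generalizing v' with
  | nil =>
    have : v' = [] := List.eq_nil_of_length_eq_zero (by simpa using hlen)
    simp [this]
  | cons a v ihv =>
    cases v' with
    | nil => simp at hlen
    | cons b w =>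
      have htail : VisLe v w := by
        intro i hi
        have := h (i + 1) (by simpa [List.getD] using hi)
        simpa [List.getD] using this
      have hw := ihv w (by simpa using hlen) htail
      have hhead : a = true → b = true := by
        intro ha
        have := h 0 (by simpa [List.getD] using ha)
        simpa [List.getD] using this
      have hc1 : (a :: v).count false = v.count false + (if a then 0 else 1) := by
        cases a <;> simp [List.count_cons]
      have hc2 : (b :: w).count false = w.count false + (if b then 0 else 1) := by
        cases b <;> simp [List.count_cons]
      rw [hc1, hc2]
      cases a
      · cases b <;> simp <;> omega
      · have hb := hhead rfl
        subst hb
        simp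
        omega

theorem reachA_trans (adj : List (List Int)) (s e a : Int)
    (h1 : ReachA adj s e) (h2 : ReachA adj e a) : ReachA adj s a := by
  induction h2 with
  | refl => exact h1
  | step _ hb ih => exact ReachA.step ih hb

-- === the DFS characterisation ===
theorem dfs_spec (fuel : Nat) (adj : List (List Int)) (v : List Bool) (s : Int)
    (hadj : AdjOk adj) (hlen : v.length = 26) (hs : NodeOk s) (hns : ¬ Vis v s)
    (hfuel : v.count false ≤ fuel) :
    (dfsF fuel adj v s).length = 26 ∧
    VisLe v (dfsF fuel adj v s) ∧
    Vis (dfsF fuel adj v s) s ∧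
    (∀ a, NodeOk a → Vis (dfsF fuel adj v s) a → Vis v a ∨ ReachA adj s a) ∧
    (∀ a, Vis (dfsF fuel adj v s) a → Vis v a ∨ ∀ b ∈ Nbrs adj a, Vis (dfsF fuel adj v s) b) := by
  induction fuel generalizing v s with
  | zero =>
    exfalso
    obtain ⟨hs0, hs1⟩ := hs
    have hsn : s.toNat < v.length := by omega
    have hfalse : v.getD s.toNat false = false := by
      cases hq : v.getD s.toNat false
      · rfl
      · exact absurd hq hns
    rw [getD_eq_getElem' v s.toNat false hsn] at hfalse
    have : false ∈ v := hfalse ▸ List.getElem_mem hsn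
    have := List.count_pos_iff.mpr this
    omega
  | succ fuel ih =>
    obtain ⟨hs0, hs1⟩ := hs
    have hsn : s.toNat < v.length := by omega
    simp only [dfsF]
    set v1 := v.set s.toNat true with hv1def
    have hv1len : v1.length = 26 := by simp [hv1def, hlen]
    have hv1s : Vis v1 s := by
      unfold Vis
      rw [hv1def, getD_set_formula _ _ _ _ _ hsn]
      simp
    have hle1 : VisLe v v1 := by
      intro i hi
      rw [hv1def, getD_set_formula _ _ _ _ _ hsn]
      split <;> simp_all
    have hfv : v.getD s.toNat false = false := by
      cases hq : v.getD s.toNat false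
      · rfl
      · exact absurd hq hns
    have hcount1 : v1.count false + 1 = v.count false := count_false_set v s.toNat hsn hfv
    -- the inner 'for end in adj[start]' fold
    have fold : ∀ (l : List Int) (vis : List Bool), (∀ b ∈ l, NodeOk b) →
        vis.length = 26 → vis.count false ≤ fuel →
        ((l.foldl (fun vis e => if vis.getD e.toNat false then vis else dfsF fuel adj vis e) vis).length = 26 ∧
         VisLe vis (l.foldl (fun vis e => if vis.getD e.toNat false then vis else dfsF fuel adj vis e) vis) ∧
         (∀ b ∈ l, Vis (l.foldl (fun vis e => if vis.getD e.toNat false then vis else dfsF fuel adj vis e) vis) b) ∧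
         (∀ a, NodeOk a → Vis (l.foldl (fun vis e => if vis.getD e.toNat false then vis else dfsF fuel adj vis e) vis) a →
            Vis vis a ∨ ∃ e ∈ l, ReachA adj e a) ∧
         (∀ a, Vis (l.foldl (fun vis e => if vis.getD e.toNat false then vis else dfsF fuel adj vis e) vis) a →
            Vis vis a ∨ ∀ b ∈ Nbrs adj a, Vis (l.foldl (fun vis e => if vis.getD e.toNat false then vis else dfsF fuel adj vis e) vis) b)) := by
      intro l
      induction l with
      | nil =>
        intro vis _ hvl _
        refine ⟨hvl, fun i hi => hi, by simp, fun a _ ha => Or.inl ha, fun a ha => Or.inl ha⟩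
      | cons e l ihl =>
        intro vis hok hvl hvc
        simp only [List.foldl_cons]
        by_cases hve : vis.getD e.toNat false = true
        · simp only [hve, if_true]
          obtain ⟨c1, c2, c3, c4, c5⟩ := ihl vis (fun b hb => hok b (List.mem_cons_of_mem _ hb)) hvl hvc
          refine ⟨c1, c2, ?_, ?_, c5⟩
          · intro b hb
            rcases List.mem_cons.mp hb with hb | hb
            · subst hb; exact c2 _ hve
            · exact c3 b hb
          · intro a hna ha
            rcases c4 a hna ha with h | ⟨e', he', hr⟩
            · exact Or.inl h
            · exact Or.inr ⟨e', List.mem_cons_of_mem _ he', hr⟩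
        · simp only [hve, if_false, Bool.false_eq_true]
          have hce : ¬ Vis vis e := hve
          obtain ⟨p1, p2, p3, p4, p6⟩ :=
            ih vis e hvl (hok e (List.mem_cons_self)) hce hvc
          set vis' := dfsF fuel adj vis e with hvis'
          have hvc' : vis'.count false ≤ fuel :=
            le_trans (count_false_le_of_visle vis vis' (by omega) p2) hvc
          obtain ⟨c1, c2, c3, c4, c5⟩ := ihl vis' (fun b hb => hok b (List.mem_cons_of_mem _ hb)) p1 hvc'
          refine ⟨c1, ?_, ?_, ?_, ?_⟩
          · intro i hi
            exact c2 i (p2 i hi)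
          · intro b hb
            rcases List.mem_cons.mp hb with hb | hb
            · subst hb; exact c2 _ p3
            · exact c3 b hb
          · intro a hna ha
            rcases c4 a hna ha with h | ⟨e', he', hr⟩
            · rcases p4 a hna h with h' | h'
              · exact Or.inl h'
              · exact Or.inr ⟨e, List.mem_cons_self, h'⟩
            · exact Or.inr ⟨e', List.mem_cons_of_mem _ he', hr⟩
          · intro a ha
            rcases c5 a ha with h | h
            · rcases p6 a h with h' | h'
              · exact Or.inl h'
              · exact Or.inr (fun b hb => c2 _ (h' b hb))
            · exact Or.inr h
    have hnb : ∀ b ∈ adj.getD s.toNat [], NodeOk b := fun b hb => hadj s.toNat b hb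
    obtain ⟨c1, c2, c3, c4, c5⟩ := fold (adj.getD s.toNat []) v1 hnb hv1len (by omega)
    refine ⟨c1, ?_, c2 _ hv1s, ?_, ?_⟩
    · intro i hi
      exact c2 i (hle1 i hi)
    · intro a hna ha
      rcases c4 a hna ha with h | ⟨e, he, hr⟩
      · unfold Vis at h
        rw [hv1def, getD_set_formula _ _ _ _ _ hsn] at h
        by_cases heq : a.toNat = s.toNat
        · obtain ⟨ha0, ha1⟩ := hna
          have : a = s := by omega
          exact Or.inr (this ▸ ReachA.refl)
        · rw [if_neg heq] at h
          exact Or.inl h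
      · exact Or.inr (reachA_trans adj s e a (ReachA.step ReachA.refl he) hr)
    · intro a ha
      rcases c5 a ha with h | h
      · unfold Vis at h
        rw [hv1def, getD_set_formula _ _ _ _ _ hsn] at h
        by_cases heq : a.toNat = s.toNat
        · refine Or.inr ?_
          intro b hb
          apply c3
          unfold Nbrs at hb
          rwa [heq] at hb
        · rw [if_neg heq] at h
          exact Or.inl h
      · exact Or.inr h

theorem dfs_char (adj : List (List Int)) (s : Int) (hadj : AdjOk adj) (hs : NodeOk s) :
    ∀ a, NodeOk a →
      (Vis (dfsF 27 adj (List.replicate 26 false) s) a ↔ ReachA adj s a) := by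
  have hv0 : ∀ i : Nat, (List.replicate 26 false).getD i false = false :=
    fun i => getD_replicate 26 i false
  obtain ⟨p1, p2, p3, p4, p6⟩ := dfs_spec 27 adj (List.replicate 26 false) s hadj
    (by simp) hs (by intro h; unfold Vis at h; rw [hv0] at h; simp at h) (by decide)
  have back : ∀ a, ReachA adj s a → Vis (dfsF 27 adj (List.replicate 26 false) s) a := by
    intro a h
    induction h with
    | refl => exact p3
    | step hra hb ihr =>
      rcases p6 _ ihr with h' | h'
      · exfalso; unfold Vis at h'; rw [hv0] at h'; simp at h'
      · exact h' _ hb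
  intro a hna
  constructor
  · intro h
    rcases p4 a hna h with h' | h'
    · exfalso; unfold Vis at h'; rw [hv0] at h'; simp at h'
    · exact h'
  · exact back a

-- === the relaxation closure characterisation ===
theorem relax_mono (E : List (Int × Int)) : ∀ (S : List Int), SSub S (relaxRound E S) := by
  induction E with
  | nil => intro S a ha; simpa [relaxRound] using ha
  | cons e E ihE =>
    intro S a ha
    simp only [relaxRound, List.foldl_cons]
    apply ihE
    split
    · exact (PySem.Set.mem_add _ _ _).mpr (Or.inl ha)
    · exact ha

theorem relax_sound (E0 : List (Int × Int)) (s : Int) :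
    ∀ (E : List (Int × Int)) (S : List Int), (∀ e ∈ E, e ∈ E0) →
      (∀ a ∈ S, ReachE E0 s a) → ∀ a ∈ relaxRound E S, ReachE E0 s a := by
  intro E
  induction E with
  | nil => intro S _ hS a ha; exact hS a (by simpa [relaxRound] using ha)
  | cons e E ihE =>
    intro S hE hS a ha
    simp only [relaxRound, List.foldl_cons] at ha
    refine ihE _ (fun e' he' => hE e' (List.mem_cons_of_mem _ he')) ?_ a ha
    intro b hb
    split at hb
    · rcases (PySem.Set.mem_add _ _ _).mp hb with hb' | hb'
      · exact hS b hb'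
      · subst hb'
        rename_i hcont
        have hx : e.1 ∈ S := (PySem.Set.contains_iff _ _).mp hcont
        exact ReachE.step (hS e.1 hx) (by simpa using hE e (List.mem_cons_self))
    · exact hS b hb

theorem relax_congr (E : List (Int × Int)) :
    ∀ (S T : List Int), SEq S T → SEq (relaxRound E S) (relaxRound E T) := by
  induction E with
  | nil => intro S T h; simpa [relaxRound] using h
  | cons e E ihE =>
    intro S T h
    simp only [relaxRound, List.foldl_cons]
    have hcond : PySem.Set.contains S e.1 = PySem.Set.contains T e.1 := by
      cases hS : PySem.Set.contains S e.1 <;> cases hT : PySem.Set.contains T e.1 <;> try rfl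
      · have := (PySem.Set.contains_iff T e.1).mp hT
        have := (h e.1).mpr this
        have := (PySem.Set.contains_iff S e.1).mpr this
        simp_all
      · have := (PySem.Set.contains_iff S e.1).mp hS
        have := (h e.1).mp this
        have := (PySem.Set.contains_iff T e.1).mpr this
        simp_all
    rw [← hcond]
    split
    · exact ihE _ _ (fun a => by
        rw [PySem.Set.mem_add, PySem.Set.mem_add]
        exact or_congr (h a) Iff.rfl)
    · exact ihE _ _ h

theorem relax_mem_of_edge (x y : Int) :
    ∀ (E : List (Int × Int)) (T : List Int), x ∈ T → (x, y) ∈ E → y ∈ relaxRound E T := by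
  intro E
  induction E with
  | nil => intro T _ hxy; simp at hxy
  | cons e E ihE =>
    intro T hx hxy
    simp only [relaxRound, List.foldl_cons]
    rcases List.mem_cons.mp hxy with he | he
    · have hc : PySem.Set.contains T e.1 = true := by
        rw [PySem.Set.contains_iff]
        rw [← he]
        exact hx
      rw [hc, if_pos rfl]
      apply relax_mono
      rw [PySem.Set.mem_add]
      right
      rw [← he]
    · have hx' : x ∈ (if PySem.Set.contains T e.1 = true then PySem.Set.add T e.2 else T) := by
        split
        · rw [PySem.Set.mem_add]; exact Or.inl hx
        · exact hx
      exact ihE _ hx' he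

theorem relax_nodeok (E : List (Int × Int)) (hE : ∀ e ∈ E, NodeOk e.2) :
    ∀ (S : List Int), (∀ a ∈ S, NodeOk a) → ∀ a ∈ relaxRound E S, NodeOk a := by
  induction E with
  | nil => intro S hS a ha; exact hS a (by simpa [relaxRound] using ha)
  | cons e E ihE =>
    intro S hS a ha
    simp only [relaxRound, List.foldl_cons] at ha
    refine ihE (fun e' he' => hE e' (List.mem_cons_of_mem _ he')) _ ?_ a ha
    intro b hb
    split at hb
    · rcases (PySem.Set.mem_add _ _ _).mp hb with hb' | hb'
      · exact hS b hb'
      · subst hb'; exact hE e (List.mem_cons_self)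
    · exact hS b hb

theorem foldl_range_iterate {α : Type} (f : α → α) (x : α) :
    ∀ n : Nat, (List.range n).foldl (fun a _ => f a) x = f^[n] x := by
  intro n
  induction n with
  | zero => simp
  | succ n ihn =>
    rw [List.range_succ, List.foldl_append, ihn]
    simp only [List.foldl_cons, List.foldl_nil]
    exact (Function.iterate_succ_apply' f n x).symm

theorem iter_fixed (E : List (Int × Int)) (S : List Int) (h : SEq (relaxRound E S) S) :
    ∀ k, SEq ((relaxRound E)^[k] S) S := by
  intro k
  induction k with
  | zero => intro a; rfl
  | succ k ihk =>
    intro a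
    rw [Function.iterate_succ_apply']
    exact Iff.trans ((relax_congr E _ _ ihk) a) (h a)

theorem iter_mono (E : List (Int × Int)) (S : List Int) :
    ∀ k, SSub S ((relaxRound E)^[k] S) := by
  intro k
  induction k with
  | zero => intro a ha; exact ha
  | succ k ihk =>
    intro a ha
    rw [Function.iterate_succ_apply']
    exact relax_mono E _ a (ihk a ha)

theorem iter_nodeok (E : List (Int × Int)) (s : Int) (hs : NodeOk s)
    (hE : ∀ e ∈ E, NodeOk e.2) : ∀ k, ∀ a ∈ (relaxRound E)^[k] [s], NodeOk a := by
  intro k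
  induction k with
  | zero =>
    intro a ha
    have : a = s := by simpa using ha
    exact this ▸ hs
  | succ k ihk =>
    intro a ha
    rw [Function.iterate_succ_apply'] at ha
    exact relax_nodeok E hE _ ihk a ha

theorem closure_closed (E : List (Int × Int)) (s : Int) (hs : NodeOk s)
    (hE : ∀ e ∈ E, NodeOk e.1 ∧ NodeOk e.2) :
    ∀ e ∈ E, e.1 ∈ (relaxRound E)^[26] [s] → e.2 ∈ (relaxRound E)^[26] [s] := by
  by_cases hfix : ∃ i < 26, SEq ((relaxRound E)^[i+1] [s]) ((relaxRound E)^[i] [s])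
  · obtain ⟨i, hi, hEq⟩ := hfix
    have hEq' : SEq (relaxRound E ((relaxRound E)^[i] [s])) ((relaxRound E)^[i] [s]) := by
      intro a
      have hit := Function.iterate_succ_apply' (relaxRound E) i [s]
      rw [← hit]
      exact hEq a
    have h26 : SEq ((relaxRound E)^[26] [s]) ((relaxRound E)^[i] [s]) := by
      intro a
      have h26i : (26 : Nat) = (26 - i) + i := by omega
      rw [h26i, Function.iterate_add_apply]
      exact iter_fixed E _ hEq' (26 - i) a
    intro e he h1
    have hx : e.1 ∈ (relaxRound E)^[i] [s] := (h26 e.1).mp h1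
    have : e.2 ∈ relaxRound E ((relaxRound E)^[i] [s]) :=
      relax_mem_of_edge e.1 e.2 E _ hx (by simpa using he)
    exact (h26 e.2).mpr ((hEq' e.2).mp this)
  · exfalso
    push_neg at hfix
    have grow : ∀ i : Nat, i ≤ 26 → i + 1 ≤ ((relaxRound E)^[i] [s]).toFinset.card := by
      intro i
      induction i with
      | zero => intro _; simp
      | succ i ihi =>
        intro hi
        have hcard := ihi (by omega)
        have hsub : ((relaxRound E)^[i] [s]).toFinset ⊂ ((relaxRound E)^[i+1] [s]).toFinset := by
          constructor
          · intro a ha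
            rw [List.mem_toFinset] at *
            rw [Function.iterate_succ_apply']
            exact relax_mono E _ a (by simpa using ha)
          · intro hcon
            apply hfix i (by omega)
            intro a
            constructor
            · intro ha
              have := hcon (List.mem_toFinset.mpr ha)
              exact List.mem_toFinset.mp this
            · intro ha
              rw [Function.iterate_succ_apply']
              exact relax_mono E _ a ha
        have := Finset.card_lt_card hsub
        omega
    have h27 : 27 ≤ ((relaxRound E)^[26] [s]).toFinset.card := grow 26 (by omega)
    have hsubIcc : ((relaxRound E)^[26] [s]).toFinset ⊆ Finset.Icc (0 : Int) 25 := by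
      intro a ha
      obtain ⟨ha0, ha1⟩ := iter_nodeok E s hs (fun e he => (hE e he).2) 26 a (List.mem_toFinset.mp ha)
      rw [Finset.mem_Icc]
      exact ⟨ha0, by omega⟩
    have hcle := Finset.card_le_card hsubIcc
    have hIcc : (Finset.Icc (0 : Int) 25).card = 26 := by decide
    omega

theorem closure_char (E : List (Int × Int)) (s : Int) (hs : NodeOk s)
    (hE : ∀ e ∈ E, NodeOk e.1 ∧ NodeOk e.2) :
    ∀ a, a ∈ (relaxRound E)^[26] [s] ↔ ReachE E s a := by
  intro a
  constructor
  · intro ha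
    have sound : ∀ k, ∀ b ∈ (relaxRound E)^[k] [s], ReachE E s b := by
      intro k
      induction k with
      | zero =>
        intro b hb
        have : b = s := by simpa using hb
        exact this ▸ ReachE.refl
      | succ k ihk =>
        intro b hb
        rw [Function.iterate_succ_apply'] at hb
        exact relax_sound E s E _ (fun e he => he) ihk b hb
    exact sound 26 a ha
  · intro h
    induction h with
    | refl => exact iter_mono E [s] 26 s (by simp)
    | step hra hab ihr => exact closure_closed E s hs hE _ hab ihr

-- === bridging the two graph representations ===
theorem reachA_of_reachE (adj : List (List Int)) (E : List (Int × Int)) (s : Int)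
    (hs : NodeOk s) (hE : ∀ e ∈ E, NodeOk e.1 ∧ NodeOk e.2)
    (hbr : ∀ (i : Nat) (b : Int), b ∈ adj.getD i [] ↔ ((i : Int), b) ∈ E) :
    ∀ a, ReachE E s a → NodeOk a ∧ ReachA adj s a := by
  intro a h
  induction h with
  | refl => exact ⟨hs, ReachA.refl⟩
  | step hra hab ihr =>
    rename_i a' b'
    obtain ⟨hna, hraa⟩ := ihr
    have hcast : ((a'.toNat : Int)) = a' := Int.toNat_of_nonneg hna.1
    have hb : b' ∈ adj.getD a'.toNat [] := by
      rw [hbr a'.toNat b', hcast]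
      exact hab
    exact ⟨(hE _ hab).2, ReachA.step hraa hb⟩

theorem reachE_of_reachA (adj : List (List Int)) (E : List (Int × Int)) (s : Int)
    (hs : NodeOk s) (hE : ∀ e ∈ E, NodeOk e.1 ∧ NodeOk e.2)
    (hbr : ∀ (i : Nat) (b : Int), b ∈ adj.getD i [] ↔ ((i : Int), b) ∈ E) :
    ∀ a, ReachA adj s a → NodeOk a ∧ ReachE E s a := by
  intro a h
  induction h with
  | refl => exact ⟨hs, ReachE.refl⟩
  | step hra hb ihr =>
    rename_i a' b'
    obtain ⟨hna, hrea⟩ := ihr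
    have hcast : ((a'.toNat : Int)) = a' := Int.toNat_of_nonneg hna.1
    have hab : (a', b') ∈ E := by
      rw [← hcast]
      exact (hbr a'.toNat b').mp hb
    exact ⟨(hE _ hab).2, ReachE.step hrea hab⟩

-- === relating the two building loops ===
def BuildInv (sa : List Bool × List (List Int) × List Int × List Int)
    (sb : List Int × PySem.Set Int × List (Int × Int)) : Prop :=
  sa.1.length = 26 ∧ sa.2.1.length = 26 ∧ sa.2.2.1.length = 26 ∧ sa.2.2.2.length = 26 ∧
  sb.1.length = 26 ∧
  (∀ i : Nat, i < 26 → sb.1.getD i 0 = sa.2.2.1.getD i 0 - sa.2.2.2.getD i 0) ∧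
  (∀ i : Nat, i < 26 → (sa.1.getD i false = true ↔ (i : Int) ∈ sb.2.1)) ∧
  (∀ m ∈ sb.2.1, NodeOk m) ∧
  (∀ (i : Nat) (b : Int), b ∈ sa.2.1.getD i [] ↔ ((i : Int), b) ∈ sb.2.2) ∧
  (∀ e ∈ sb.2.2, NodeOk e.1 ∧ NodeOk e.2)

theorem goodword_nodes (w : String) (h : GoodWord w) :
    NodeOk (pvOrd0 w) ∧ NodeOk (pvOrdLast w) := by
  obtain ⟨-, h1, h2, h3, h4⟩ := h
  unfold pvOrd0 pvOrdLast NodeOk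
  omega

theorem buildinv_step (sa : List Bool × List (List Int) × List Int × List Int)
    (sb : List Int × PySem.Set Int × List (Int × Int)) (w : String)
    (h : BuildInv sa sb) (hw : GoodWord w) : BuildInv (stepA sa w) (stepB sb w) := by
  obtain ⟨mark, adj, inB, outB⟩ := sa
  obtain ⟨deg, marks, edges⟩ := sb
  obtain ⟨hml, hal, hil, hol, hdl, hdeg, hmk, hmok, hbr, heok⟩ := h
  obtain ⟨hx, hy⟩ := goodword_nodes w hw
  simp only [stepA, stepB, BuildInv] at *
  set x := pvOrd0 w with hxdef
  set y := pvOrdLast w with hydef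
  have hxn : x.toNat < 26 := by unfold NodeOk at hx; omega
  have hyn : y.toNat < 26 := by unfold NodeOk at hy; omega
  have hxi : ∀ i : Nat, ((i : Int) = x ↔ i = x.toNat) := by
    intro i; unfold NodeOk at hx; omega
  have hyi : ∀ i : Nat, ((i : Int) = y ↔ i = y.toNat) := by
    intro i; unfold NodeOk at hy; omega
  refine ⟨by simp [hml], by simp [hal], by simp [hil], by simp [hol], by simp [hdl],
    ?_, ?_, ?_, ?_, ?_⟩
  · -- degree difference
    intro i hi
    have e1 : ∀ j : Nat, j < 26 →
        (deg.set x.toNat (deg.getD x.toNat 0 + 1)).getD j 0 =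
          if j = x.toNat then deg.getD x.toNat 0 + 1 else deg.getD j 0 :=
      fun j _ => getD_set_formula deg x.toNat j _ 0 (by omega)
    rw [getD_set_formula _ y.toNat i _ 0 (by simp [hdl]; omega),
        getD_set_formula inB x.toNat i _ 0 (by omega),
        getD_set_formula outB y.toNat i _ 0 (by omega),
        e1 y.toNat hyn, e1 i hi]
    have h1 := hdeg i hi
    have h2 := hdeg x.toNat hxn
    have h3 := hdeg y.toNat hyn
    split_ifs <;> simp_all <;> omega
  · -- marks
    intro i hi
    rw [getD_set_formula _ y.toNat i _ false (by simp [hml]; omega),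
        getD_set_formula mark x.toNat i _ false (by omega)]
    rw [PySem.Set.mem_add, PySem.Set.mem_add]
    have h1 := hmk i hi
    split_ifs with e1 e2
    · exact iff_of_true rfl (Or.inr ((hyi i).mpr e1))
    · exact iff_of_true rfl (Or.inl (Or.inr ((hxi i).mpr e2)))
    · have nx : ¬ ((i : Int) = x) := fun hc => e2 ((hxi i).mp hc)
      have ny : ¬ ((i : Int) = y) := fun hc => e1 ((hyi i).mp hc)
      rw [h1]
      tauto
  · -- marks valid
    intro m hm
    rcases (PySem.Set.mem_add _ _ _).mp hm with hm' | hm'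
    · rcases (PySem.Set.mem_add _ _ _).mp hm' with hm'' | hm''
      · exact hmok m hm''
      · exact hm'' ▸ hx
    · exact hm' ▸ hy
  · -- adjacency ↔ edges
    intro i b
    rw [getD_set_formula adj x.toNat i _ [] (by omega), List.mem_append]
    by_cases hie : i = x.toNat
    · rw [if_pos hie, List.mem_append]
      have hcast : ((i : Int)) = x := (hxi i).mpr hie
      constructor
      · rintro (hb | hb)
        · exact Or.inl (by rw [hie]; exact (hbr x.toNat b).mp hb)
        · simp only [List.mem_singleton] at hb
          subst hb
          exact Or.inr (by simp [hcast])
      · rintro (hb | hb)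
        · rw [← hie]
          exact Or.inl ((hbr i b).mpr hb)
        · simp only [List.mem_singleton, Prod.mk.injEq] at hb
          rw [← hie]
          exact Or.inr (by simp [hb.2])
    · rw [if_neg hie]
      constructor
      · exact fun hb => Or.inl ((hbr i b).mp hb)
      · rintro (hb | hb)
        · exact (hbr i b).mpr hb
        · exfalso
          simp only [List.mem_singleton, Prod.mk.injEq] at hb
          exact hie ((hxi i).mp hb.1)
  · -- edges valid
    intro e he
    rcases List.mem_append.mp he with he' | he'
    · exact heok e he'
    · simp at he'
      rw [he']
      exact ⟨hx, hy⟩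

theorem buildinv_fold (ws : List String) :
    ∀ sa sb, BuildInv sa sb → (∀ w ∈ ws, GoodWord w) →
      BuildInv (ws.foldl stepA sa) (ws.foldl stepB sb) := by
  induction ws with
  | nil => intro sa sb h _; exact h
  | cons w ws ihw =>
    intro sa sb h hg
    simp only [List.foldl_cons]
    exact ihw _ _ (buildinv_step sa sb w h (hg w (List.mem_cons_self)))
      (fun w' hw' => hg w' (List.mem_cons_of_mem _ hw'))

theorem buildinv_init : BuildInv
    (List.replicate 26 false, List.replicate 26 ([] : List Int),
     List.replicate 26 (0 : Int), List.replicate 26 (0 : Int))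
    (List.replicate 26 (0 : Int), PySem.Set.empty, []) := by
  refine ⟨by simp, by simp, by simp, by simp, by simp, ?_, ?_, ?_, ?_, ?_⟩
  · intro i _
    show (List.replicate 26 (0 : Int)).getD i 0 =
      (List.replicate 26 (0 : Int)).getD i 0 - (List.replicate 26 (0 : Int)).getD i 0
    rw [getD_replicate]
    omega
  · intro i _
    rw [getD_replicate]
    simp [PySem.Set.empty]
  · intro m hm
    simp [PySem.Set.empty] at hm
  · intro i b
    rw [getD_replicate]
    simp
  · intro e he
    simp at he

-- ===== VERDICT (by name: the statement is the Claim_ definition above) =====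
theorem chainedWords_spec : Claim_equal_chainedWords := by
  intro words _ hpre
  obtain ⟨hne, hgood⟩ := hpre
  unfold Spec_chainedWords chainedWords chainedWords_alt
  have hinv := buildinv_fold words _ _ buildinv_init hgood
  set sa := words.foldl stepA
    (List.replicate 26 false, List.replicate 26 ([] : List Int),
     List.replicate 26 (0 : Int), List.replicate 26 (0 : Int)) with hsadef
  set sb := words.foldl stepB (List.replicate 26 (0 : Int), PySem.Set.empty, []) with hsbdef
  obtain ⟨hml, hal, hil, hol, hdl, hdeg, hmk, hmok, hbr, heok⟩ := hinv
  set s := pvOrd0 (words.headD "") with hsdef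
  have hsok : NodeOk s := by
    have : words.headD "" ∈ words := by
      cases words with
      | nil => exact absurd rfl hne
      | cons w ws => simp
    exact (goodword_nodes _ (hgood _ this)).1
  -- the two balance tests agree
  have hbalA : ((List.range 26).all (fun i => sa.2.2.1.getD i 0 == sa.2.2.2.getD i 0)) = true ↔
      (∀ i : Nat, i < 26 → sa.2.2.1.getD i 0 = sa.2.2.2.getD i 0) := by
    rw [List.all_eq_true]
    constructor
    · intro h i hi
      exact beq_iff_eq.mp (h i (List.mem_range.mpr hi))
    · intro h i hi
      exact beq_iff_eq.mpr (h i (List.mem_range.mp hi))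
  have hbalB : (sb.1.any (fun d => d != 0)) = false ↔
      (∀ i : Nat, i < 26 → sa.2.2.1.getD i 0 = sa.2.2.2.getD i 0) := by
    rw [List.any_eq_false]
    constructor
    · intro h i hi
      have hi' : i < sb.1.length := by omega
      have hmem : sb.1.getD i 0 ∈ sb.1 := by
        rw [getD_eq_getElem' _ _ _ hi']
        exact List.getElem_mem hi'
      have hz : sb.1.getD i 0 = 0 := by simpa using h _ hmem
      have := hdeg i hi
      omega
    · intro h d hd
      obtain ⟨i, hi, hdi⟩ := List.mem_iff_getElem.mp hd
      have hi26 : i < 26 := by omega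
      have hgd : sb.1.getD i 0 = d := by
        rw [getD_eq_getElem' _ _ _ hi]; exact hdi
      have h1 := hdeg i hi26
      have h2 := h i hi26
      have hd0 : d = 0 := by omega
      simp [hd0]
  by_cases hbal : ∀ i : Nat, i < 26 → sa.2.2.1.getD i 0 = sa.2.2.2.getD i 0
  · rw [if_pos (hbalA.mpr hbal), if_neg (by simp [hbalB.mpr hbal])]
    -- connectivity
    have hadjok : AdjOk sa.2.1 := by
      intro i b hb
      exact (heok _ ((hbr i b).mp hb)).2
    have hreach := dfs_char sa.2.1 s hadjok hsok
    have hS0 : PySem.Set.add PySem.Set.empty s = [s] := by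
      rw [PySem.Set.add_eq_ite]
      simp [PySem.Set.empty]
    rw [hS0, foldl_range_iterate]
    have hclos := closure_char sb.2.2 s hsok heok
    rw [Bool.eq_iff_iff]
    unfold isConnectedA
    rw [List.all_eq_true, PySem.Set.issubset_iff]
    constructor
    · intro h m hm
      obtain ⟨hm0, hm1⟩ := hmok m hm
      have hi : m.toNat < 26 := by omega
      have hcast : ((m.toNat : Int)) = m := Int.toNat_of_nonneg hm0
      have hmod := h m.toNat (List.mem_range.mpr hi)
      simp only [Bool.not_eq_eq_eq_not, Bool.not_true, Bool.and_eq_false_imp] at hmod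
      have hmark : sa.1.getD m.toNat false = true := by
        rw [hmk m.toNat hi, hcast]
        exact hm
      have hvis := hmod hmark
      simp only [Bool.not_eq_false] at hvis
      have hv : Vis (dfsF 27 sa.2.1 (List.replicate 26 false) s) m := by
        unfold Vis
        rw [Bool.not_false] at hvis
        exact hvis
      have hra := (hreach m ⟨hm0, hm1⟩).mp hv
      have hre := (reachE_of_reachA sa.2.1 sb.2.2 s hsok heok hbr m hra).2
      exact (hclos m).mpr hre
    · intro h i hi
      rw [List.mem_range] at hi
      simp only [Bool.not_eq_eq_eq_not, Bool.not_true, Bool.and_eq_false_imp]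
      intro hmark
      have hm : ((i : Int)) ∈ sb.2.1 := (hmk i hi).mp hmark
      have hre := (hclos _).mp (h _ hm)
      have hiok : NodeOk ((i : Int)) := ⟨by omega, by omega⟩
      have hra := (reachA_of_reachE sa.2.1 sb.2.2 s hsok heok hbr _ hre).2
      have hv := (hreach _ hiok).mpr hra
      unfold Vis at hv
      simp only [Int.toNat_natCast] at hv
      rw [Bool.not_false]
      exact hv
  · have hA : ¬ ((List.range 26).all (fun i => sa.2.2.1.getD i 0 == sa.2.2.2.getD i 0)) = true :=
      fun hc => hbal (hbalA.mp hc)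
    have hB : (sb.1.any (fun d => d != 0)) = true := by
      cases hq : (sb.1.any (fun d => d != 0))
      · exact absurd (hbalB.mp hq) hbal
      · rfl
    rw [if_neg hA, if_pos hB]
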